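-- pv_equiv track=rewrite | github.com/willhasgithub/willhasgithub_code_examples | python_examples/edabit_coding_challenges/__init__.py | split_parentheses
-- ===== SOURCE A (Python) =====
-- def split_parentheses(txt):
--     balanced_parentheses = []
--     last_split = 0
--
--     for i in range(1, len(txt) + 1):
--         if txt[last_split:i].count('(') - txt[last_split:i].count(')') == 0:
--             balanced_parentheses.append(txt[last_split:i])
--             last_split = i
--
--     return balanced_parentheses
-- ===== SOURCE B (Python) =====
-- def split_parentheses(txt):
--     res = []
--     cur = []
--     bal = 0
--     for ch in txt:
--         cur.append(ch)
--         if ch == '(':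
--             bal += 1
--         elif ch == ')':
--             bal -= 1
--         if bal == 0:
--             res.append(''.join(cur))
--             cur = []
--     return res
-- ===== Notes on version B (the rewrite author's own statement) =====
-- stated objective: faster
-- what changed: Replaces the quadratic loop that recounts opening and closing parentheses over the whole slice since the last split at every index with a single pass that maintains a running balance counter and emits the accumulated segment whenever the balance returns to zero.
import Mathlib
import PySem

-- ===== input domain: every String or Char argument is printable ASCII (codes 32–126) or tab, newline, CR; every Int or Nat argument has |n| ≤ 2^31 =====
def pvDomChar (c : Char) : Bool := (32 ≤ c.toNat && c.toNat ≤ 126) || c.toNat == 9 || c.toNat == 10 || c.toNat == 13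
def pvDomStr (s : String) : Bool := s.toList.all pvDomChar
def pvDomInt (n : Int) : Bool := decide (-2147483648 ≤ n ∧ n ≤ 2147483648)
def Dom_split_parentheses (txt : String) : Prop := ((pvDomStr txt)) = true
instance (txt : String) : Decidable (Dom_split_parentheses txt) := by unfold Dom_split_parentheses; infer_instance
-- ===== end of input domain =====

-- B replaces A's re-count over the slice since the last split (quadratic) by a single
-- pass with a running balance counter, emitting the segment when the balance hits zero.


-- ===== PORT A =====
-- for i in range(1, len(txt)+1): if txt[last_split:i].count('(') - txt[last_split:i].count(')') == 0:
--   append the slice, last_split = i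
def split_parentheses (txt : String) : List String :=
  (PySem.List.pyRange 1 ((PySem.Str.len txt : Int) + 1) 1).foldl
    (fun (st : List String × Int) i =>
      if ((PySem.Str.count (PySem.Str.slice txt (some st.2) (some i)) "(" : Int)
          - (PySem.Str.count (PySem.Str.slice txt (some st.2) (some i)) ")" : Int)) = 0 then
        (st.1 ++ [PySem.Str.slice txt (some st.2) (some i)], i)
      else st)
    ([], 0) |>.1

-- ===== PORT B =====
-- one pass over the characters: res, cur (current segment), bal (running balance)
def pvLoopB : List Char → List String → List Char → Int → List String
  | [], res, _cur, _bal => res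
  | c :: rest, res, cur, bal =>
    let cur' := cur ++ [c]
    let bal' := bal + (if c = '(' then 1 else if c = ')' then -1 else 0)
    if bal' = 0 then pvLoopB rest (res ++ [String.ofList cur']) [] bal'
    else pvLoopB rest res cur' bal'

def split_parentheses_alt (txt : String) : List String :=
  pvLoopB txt.toList [] [] 0

-- ===== PRECONDITION & SPEC =====
def Spec_split_parentheses (txt : String) (out : List String) : Prop := out = split_parentheses_alt txt
instance (txt : String) (out : List String) : Decidable (Spec_split_parentheses txt out) := by unfold Spec_split_parentheses; infer_instance

-- ===== CLAIM (what is proved, stated in full; the proofs are below) =====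
def Claim_equal_split_parentheses : Prop := ∀ (txt : String), Dom_split_parentheses txt → Spec_split_parentheses txt (split_parentheses txt)

-- ===== LEMMAS AND PROOFS =====

-- Python's str.count of a single character is List.count (no PySem lemma names this form).
theorem pv_count_go_singleton (c : Char) : ∀ (fuel : Nat) (s : List Char) (acc : Nat),
    s.length ≤ fuel → PySem.Chars.count.go [c] fuel s acc = acc + s.count c := by
  intro fuel
  induction fuel with
  | zero => intro s acc h
            cases s with
            | nil => simp [PySem.Chars.count.go]
            | cons a t => simp at h
  | succ n ih =>
      intro s acc h
      cases s with
      | nil => simp [PySem.Chars.count.go]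
      | cons a t =>
          simp only [PySem.Chars.count.go]
          by_cases hc : c = a
          · subst hc
            simp only [List.isPrefixOf, BEq.rfl, Bool.and_self, if_true,
              List.length_singleton, List.drop_one, List.tail_cons]
            rw [ih t (acc + 1) (by simpa using Nat.lt_succ_iff.mp (by simpa using h))]
            simp
            omega
          · have : ([c].isPrefixOf (a :: t)) = false := by
              simp [List.isPrefixOf, hc]
            rw [this]
            simp only [if_false, Bool.false_eq_true]
            rw [ih t acc (by simpa using Nat.lt_succ_iff.mp (by simpa using h))]
            simp [Ne.symm hc]

theorem pv_chars_count_singleton (s : List Char) (c : Char) :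
    PySem.Chars.count s [c] = s.count c := by
  simp only [PySem.Chars.count, List.isEmpty_cons, if_false, Bool.false_eq_true]
  simpa using pv_count_go_singleton c s.length s 0 le_rfl

-- A's fold body, named so the invariant lemma can speak about it
def pvBodyA (txt : String) (st : List String × Int) (i : Int) : List String × Int :=
  if ((PySem.Str.count (PySem.Str.slice txt (some st.2) (some i)) "(" : Int)
      - (PySem.Str.count (PySem.Str.slice txt (some st.2) (some i)) ")" : Int)) = 0 then
    (st.1 ++ [PySem.Str.slice txt (some st.2) (some i)], i)
  else st

theorem pv_slice_mid (txt : String) (done cur rest : List Char)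
    (h : txt.toList = done ++ cur ++ rest) :
    PySem.Str.slice txt (some (done.length : Int))
        (some ((done.length + cur.length : Nat) : Int))
      = String.ofList cur := by
  have hs : PySem.Str.slice txt (some (done.length : Int)) (some ((done.length + cur.length : Nat) : Int))
      = String.ofList (PySem.List.slice txt.toList (some (done.length : Int)) (some ((done.length + cur.length : Nat) : Int))) := by
    unfold PySem.Str.slice; rfl
  rw [hs, h, PySem.List.slice_natCast, Nat.add_sub_cancel_left]
  congr 1
  simp

-- balance bookkeeping: adding one character to the segment
theorem pv_loopB_bal (c : Char) (cur : List Char) :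
    ((cur.count '(' : Int) - (cur.count ')' : Int))
      + (if c = '(' then 1 else if c = ')' then -1 else 0)
      = ((cur ++ [c]).count '(' : Int) - ((cur ++ [c]).count ')' : Int) := by
  by_cases h1 : c = '('
  · subst h1; simp [List.count_append]; omega
  · by_cases h2 : c = ')'
    · subst h2; simp [List.count_append, h1]; omega
    · simp [List.count_append, h1, h2]

-- one step of B's loop, with the balance written as the counts of the current segment
theorem pv_loopB_step (c : Char) (rest cur : List Char) (acc : List String) :
    pvLoopB (c :: rest) acc cur ((cur.count '(' : Int) - (cur.count ')' : Int))
      = if (((cur ++ [c]).count '(' : Int) - ((cur ++ [c]).count ')' : Int)) = 0 then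
          pvLoopB rest (acc ++ [String.ofList (cur ++ [c])]) []
            (((cur ++ [c]).count '(' : Int) - ((cur ++ [c]).count ')' : Int))
        else pvLoopB rest acc (cur ++ [c])
            (((cur ++ [c]).count '(' : Int) - ((cur ++ [c]).count ')' : Int)) := by
  simp only [pvLoopB]
  rw [pv_loopB_bal]

-- main invariant: A's remaining fold equals B's loop on the remaining characters
theorem pv_loop_eq (txt : String) : ∀ (rest done cur : List Char) (acc : List String),
    txt.toList = done ++ cur ++ rest →
    ((PySem.List.pyRange ((done.length + cur.length + 1 : Nat) : Int)
        ((txt.toList.length : Int) + 1) 1).foldl (pvBodyA txt) (acc, (done.length : Int))).1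
      = pvLoopB rest acc cur ((cur.count '(' : Int) - (cur.count ')' : Int)) := by
  intro rest
  induction rest with
  | nil =>
      intro done cur acc h
      have hlen : txt.toList.length = done.length + cur.length := by simp [h]
      rw [PySem.List.pyRange_one_eq_nil (by simp [hlen])]
      simp [pvLoopB]
  | cons c rest ih =>
      intro done cur acc h
      have hlt : ((done.length + cur.length + 1 : Nat) : Int) < (txt.toList.length : Int) + 1 := by
        simp [h]
      rw [PySem.List.pyRange_one_cons hlt, List.foldl_cons, pv_loopB_step]
      have hseg : PySem.Str.slice txt (some (done.length : Int))
          (some ((done.length + cur.length + 1 : Nat) : Int)) = String.ofList (cur ++ [c]) := by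
        have hx := pv_slice_mid txt done (cur ++ [c]) rest (by simpa using h)
        simpa using hx
      have hpo : (PySem.Str.count (PySem.Str.slice txt (some (done.length : Int))
            (some ((done.length + cur.length + 1 : Nat) : Int))) "(" : Int)
          = ((cur ++ [c]).count '(' : Int) := by
        rw [hseg]; simp [pv_chars_count_singleton]
      have hpc : (PySem.Str.count (PySem.Str.slice txt (some (done.length : Int))
            (some ((done.length + cur.length + 1 : Nat) : Int))) ")" : Int)
          = ((cur ++ [c]).count ')' : Int) := by
        rw [hseg]; simp [pv_chars_count_singleton]
      by_cases hz : (((cur ++ [c]).count '(' : Int) - ((cur ++ [c]).count ')' : Int)) = 0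
      · have hstep : pvBodyA txt (acc, (done.length : Int)) ((done.length + cur.length + 1 : Nat) : Int)
            = (acc ++ [String.ofList (cur ++ [c])], ((done.length + cur.length + 1 : Nat) : Int)) := by
          unfold pvBodyA
          rw [hpo, hpc, if_pos hz, hseg]
        rw [hstep, if_pos hz, hz]
        have hrec := ih (done ++ cur ++ [c]) [] (acc ++ [String.ofList (cur ++ [c])])
          (by simp [h, List.append_assoc]; try omega)
        have hlen2 : (done ++ cur ++ [c]).length = done.length + cur.length + 1 := by simp; omega
        rw [hlen2] at hrec
        simp only [List.length_nil, List.count_nil, Nat.add_zero, Nat.cast_zero, sub_zero] at hrec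
        rw [show ((done.length + cur.length + 1 + 1 : Nat) : Int)
              = ((done.length + cur.length + 1 : Nat) : Int) + 1 from by push_cast; ring] at hrec
        exact hrec
      · have hstep : pvBodyA txt (acc, (done.length : Int)) ((done.length + cur.length + 1 : Nat) : Int)
            = (acc, (done.length : Int)) := by
          unfold pvBodyA
          rw [hpo, hpc, if_neg hz]
        rw [hstep, if_neg hz]
        have hrec := ih done (cur ++ [c]) acc (by simp [h, List.append_assoc]; try omega)
        have hlen3 : (cur ++ [c]).length = cur.length + 1 := by simp
        rw [hlen3] at hrec
        rw [show ((done.length + (cur.length + 1) + 1 : Nat) : Int)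
              = ((done.length + cur.length + 1 : Nat) : Int) + 1 from by push_cast; ring] at hrec
        exact hrec

-- ===== VERDICT (by name: the statement is the Claim_ definition above) =====
theorem split_parentheses_spec : Claim_equal_split_parentheses := by
  intro txt _
  unfold Spec_split_parentheses split_parentheses split_parentheses_alt
  have h := pv_loop_eq txt txt.toList [] [] [] (by simp)
  simp only [List.length_nil, List.count_nil, Nat.add_zero, Nat.zero_add,
    Nat.cast_zero, Nat.cast_one, sub_zero] at h
  exact h
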